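-- pv_equiv track=rewrite | github.com/rhakdnj/Algorithm | programmers/bruteforce/level2/so.py | solution
-- ===== SOURCE A (Python) =====
-- def solution(n, left, right):
--     graph = [[0] * n for _ in range(n)]
--     for i in range(n):
--         for j in range(n):
--             if i >= j:
--                 graph[i][j] = i + 1
--             else:
--                 graph[i][j] = graph[i][j - 1] + 1
--     answer = []
--     for row in graph:
--         answer += row
--
--     return answer[left: right + 1]
-- ===== SOURCE B (Python) =====
-- def solution(n, left, right):
--     # The flattened grid holds max(k // n, k % n) + 1 at flat index k; slice the
--     # index range and compute just the requested window (size 0 when n <= 0).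
--     size = n * n if n > 0 else 0
--     return [max(k // n, k % n) + 1 for k in range(size)[left:right + 1]]
-- ===== Notes on version B (the rewrite author's own statement) =====
-- stated objective: faster
-- what changed: B computes each output value directly by the closed formula max(k//n, k%n)+1 over the sliced index range, instead of materialising the n-by-n grid row by row and flattening it before slicing.
import Mathlib
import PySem

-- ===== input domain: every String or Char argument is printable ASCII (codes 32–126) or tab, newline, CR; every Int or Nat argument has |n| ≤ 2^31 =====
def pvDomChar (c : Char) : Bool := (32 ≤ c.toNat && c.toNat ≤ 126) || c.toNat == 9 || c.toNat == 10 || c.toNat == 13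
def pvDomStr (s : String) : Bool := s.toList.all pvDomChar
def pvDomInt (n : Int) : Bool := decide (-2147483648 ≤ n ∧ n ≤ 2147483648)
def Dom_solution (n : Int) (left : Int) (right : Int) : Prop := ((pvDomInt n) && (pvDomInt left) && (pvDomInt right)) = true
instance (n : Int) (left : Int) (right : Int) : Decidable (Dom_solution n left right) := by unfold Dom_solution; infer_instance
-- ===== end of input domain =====

-- B replaces A's O(n^2) grid construction by a closed formula evaluated only on the sliced index range.

-- ===== PORT A =====
-- Literal port: build the n×n zero grid ([0]*n for negative n is [], matched by n.toNat),
-- fill it with the two nested loops, flatten, then slice [left : right+1].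
-- graph[i][j-1] in the else branch is read with the Python-exact pyGetD (the branch only
-- fires for j > i ≥ 0, so j-1 is never negative there).
def solution (n : Int) (left : Int) (right : Int) : List Int :=
  let graph0 : List (List Int) :=
    (PySem.List.pyRange 0 n 1).map (fun _ => List.replicate n.toNat (0 : Int))
  let graph :=
    (PySem.List.pyRange 0 n 1).foldl (fun g i =>
      (PySem.List.pyRange 0 n 1).foldl (fun g j =>
        if i ≥ j then
          PySem.List.pySetD g i (PySem.List.pySetD (PySem.List.pyGetD g i []) j (i + 1))
        else
          PySem.List.pySetD g i (PySem.List.pySetD (PySem.List.pyGetD g i []) j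
            ((PySem.List.pyGetD (PySem.List.pyGetD g i []) (j - 1) 0) + 1))) g) graph0
  let answer := graph.foldl (fun acc row => acc ++ row) ([] : List Int)
  PySem.List.slice answer (some left) (some (right + 1))

-- ===== PORT B =====
-- Port of Source B: slice the index range [0, size) with Python slice semantics,
-- then map the closed formula max(k//n, k%n)+1 over the window.
def solution_alt (n : Int) (left : Int) (right : Int) : List Int :=
  let size : Int := if n > 0 then n * n else 0
  (PySem.List.slice (PySem.List.pyRange 0 size 1) (some left) (some (right + 1))).map
    (fun k => max (PySem.Int.floordiv k n) (PySem.Int.mod k n) + 1)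

-- ===== PRECONDITION & SPEC =====
def Spec_solution (n : Int) (left : Int) (right : Int) (out : List Int) : Prop := out = solution_alt n left right
instance (n : Int) (left : Int) (right : Int) (out : List Int) : Decidable (Spec_solution n left right out) := by unfold Spec_solution; infer_instance

-- ===== CLAIM (what is proved, stated in full; the proofs are below) =====
def Claim_equal_solution : Prop := ∀ (n : Int) (left : Int) (right : Int), Dom_solution n left right → Spec_solution n left right (solution n left right)

-- ===== LEMMAS AND PROOFS =====

-- the grid value A stores at cell (i, j): max(i, j) + 1
def pvCell (i j : Nat) : Int := ((max i j : Nat) : Int) + 1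

lemma pv_inner_inv (N i : Nat) (g : List (List Int)) (hi : i < g.length)
    (hrow : g[i] = List.replicate N (0:Int)) :
    ∀ a, a ≤ N →
      (List.range a).foldl (fun g' (k : Nat) =>
        if ((i:Int) ≥ (k:Int)) then
          PySem.List.pySetD g' (i:Int) (PySem.List.pySetD (PySem.List.pyGetD g' (i:Int) []) (k:Int) ((i:Int) + 1))
        else
          PySem.List.pySetD g' (i:Int) (PySem.List.pySetD (PySem.List.pyGetD g' (i:Int) []) (k:Int)
            ((PySem.List.pyGetD (PySem.List.pyGetD g' (i:Int) []) ((k:Int) - 1) 0) + 1))) g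
      = g.set i ((List.range a).map (fun j => pvCell i j) ++ List.replicate (N - a) (0:Int)) := by
  intro a
  induction a with
  | zero =>
    intro _
    simp only [List.range_zero, List.foldl_nil, List.map_nil, Nat.sub_zero, List.nil_append]
    rw [← hrow, List.set_getElem_self]
  | succ a ih =>
    intro ha
    rw [List.range_succ, List.foldl_append, ih (by omega), List.foldl_cons, List.foldl_nil]
    have hPlen : ((List.range a).map (fun j => pvCell i j)).length = a := by simp
    have hread : PySem.List.pyGetD (g.set i ((List.range a).map (fun j => pvCell i j) ++ List.replicate (N - a) (0:Int))) (i:Int) []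
        = (List.range a).map (fun j => pvCell i j) ++ List.replicate (N - a) (0:Int) := by
      simp [hi]
    have hsetrow :
        ((List.range a).map (fun j => pvCell i j) ++ List.replicate (N - a) (0:Int)).set a (pvCell i a)
        = (List.range (a+1)).map (fun j => pvCell i j) ++ (List.replicate (N - (a+1)) (0:Int)) := by
      rw [List.set_append_right _ _ (by omega), List.range_succ, List.map_append]
      have hrep : List.replicate (N - a) (0:Int) = 0 :: List.replicate (N - (a+1)) (0:Int) := by
        have h2 : N - a = (N - (a+1)) + 1 := by omega
        rw [h2, List.replicate_succ]
      rw [hrep, hPlen]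
      simp
    by_cases hcase : a ≤ i
    · rw [if_pos (by exact_mod_cast hcase)]
      have hv : ((i:Int) + 1) = pvCell i a := by
        simp [pvCell, Nat.max_eq_left hcase]
      rw [hread, PySem.List.pySetD_natCast, PySem.List.pySetD_natCast, hv, hsetrow, List.set_set, List.range_succ]
    · rw [if_neg (by exact_mod_cast hcase)]
      rw [hread]
      have hk1 : ((a:Int) - 1) = ((a - 1 : Nat) : Int) := by omega
      rw [hk1, PySem.List.pyGetD_natCast, PySem.List.pySetD_natCast, PySem.List.pySetD_natCast]
      have hget : ((List.range a).map (fun j => pvCell i j) ++ List.replicate (N - a) (0:Int)).getD (a-1) 0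
          = pvCell i (a-1) := by
        rw [List.getD_append _ _ _ _ (by simp; omega), List.getD_eq_getElem _ _ (by simp; omega)]
        simp
      have hv : pvCell i (a-1) + 1 = pvCell i a := by
        simp only [pvCell]
        rw [Nat.max_eq_right (by omega), Nat.max_eq_right (by omega)]
        omega
      rw [hget, hv, hsetrow, List.set_set, List.range_succ]

lemma pv_outer_inv (N : Nat) :
    ∀ a, a ≤ N →
      (List.range a).foldl (fun g (i : Nat) =>
        (List.range N).foldl (fun g' (k : Nat) =>
          if ((i:Int) ≥ (k:Int)) then
            PySem.List.pySetD g' (i:Int) (PySem.List.pySetD (PySem.List.pyGetD g' (i:Int) []) (k:Int) ((i:Int) + 1))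
          else
            PySem.List.pySetD g' (i:Int) (PySem.List.pySetD (PySem.List.pyGetD g' (i:Int) []) (k:Int)
              ((PySem.List.pyGetD (PySem.List.pyGetD g' (i:Int) []) ((k:Int) - 1) 0) + 1))) g)
        (List.replicate N (List.replicate N (0:Int)))
      = (List.range a).map (fun i => (List.range N).map (fun j => pvCell i j))
        ++ List.replicate (N - a) (List.replicate N (0:Int)) := by
  intro a
  induction a with
  | zero => simp
  | succ a ih =>
    intro ha
    rw [List.range_succ, List.foldl_append, ih (by omega), List.foldl_cons, List.foldl_nil]
    have hPlen : ((List.range a).map (fun i => (List.range N).map (fun j => pvCell i j))).length = a := by simp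
    have hlen : a < ((List.range a).map (fun i => (List.range N).map (fun j => pvCell i j))
        ++ List.replicate (N - a) (List.replicate N (0:Int))).length := by
      simp; omega
    have hrowa : ((List.range a).map (fun i => (List.range N).map (fun j => pvCell i j))
        ++ List.replicate (N - a) (List.replicate N (0:Int)))[a]'hlen = List.replicate N (0:Int) := by
      rw [List.getElem_append_right (by omega)]
      simp [hPlen]
    rw [pv_inner_inv N a _ hlen hrowa N (le_refl N)]
    rw [List.set_append_right _ _ (by omega)]
    have hrep : List.replicate (N - a) (List.replicate N (0:Int))
        = List.replicate N (0:Int) :: List.replicate (N - (a+1)) (List.replicate N (0:Int)) := by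
      have h2 : N - a = (N - (a+1)) + 1 := by omega
      rw [h2, List.replicate_succ]
    rw [hrep, hPlen]
    simp

def pvFlat (N k : Nat) : Int := pvCell (k / N) (k % N)

lemma pv_flatMap (N : Nat) : ∀ m, (List.range m).flatMap (fun i => (List.range N).map (fun j => pvCell i j))
    = (List.range (m*N)).map (fun k => pvFlat N k) := by
  intro m
  induction m with
  | zero => simp
  | succ m ih =>
    rw [List.range_succ, List.flatMap_append, ih]
    have hmn : (m+1)*N = m*N + N := by ring
    rw [hmn, List.range_add, List.map_append, List.map_map]
    congr 1
    simp only [List.flatMap_cons, List.flatMap_nil, List.append_nil]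
    apply List.map_congr_left
    intro x hx
    have hxN : x < N := List.mem_range.mp hx
    simp only [Function.comp, pvFlat]
    have h1 : (m * N + x) / N = m := by
      rw [Nat.add_comm, Nat.add_mul_div_right _ _ (by omega), Nat.div_eq_of_lt hxN]
      omega
    have h2 : (m * N + x) % N = x := by
      rw [Nat.add_comm, Nat.add_mul_mod_self_right, Nat.mod_eq_of_lt hxN]
    rw [h1, h2]

lemma pv_answer (N : Nat) :
    ((List.range N).map (fun i => (List.range N).map (fun j => pvCell i j))).foldl
      (fun acc row => acc ++ row) ([] : List Int)
    = (List.range (N*N)).map (fun k => pvFlat N k) := by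
  rw [List.foldl_map, PySem.List.foldl_append_eq_flatMap, List.nil_append, pv_flatMap]

lemma pv_pyRange_zero (n : Int) : PySem.List.pyRange 0 n 1 = (List.range n.toNat).map (fun (k : Nat) => (k:Int)) := by
  rw [PySem.List.pyRange_one]
  norm_num

lemma pv_A_flat (n left right : Int) :
    solution n left right
    = PySem.List.slice ((List.range (n.toNat * n.toNat)).map (fun k => pvFlat n.toNat k))
        (some left) (some (right+1)) := by
  simp only [solution]
  have hg0 : (PySem.List.pyRange 0 n 1).map (fun _ => List.replicate n.toNat (0:Int))
      = List.replicate n.toNat (List.replicate n.toNat (0:Int)) := by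
    rw [List.map_const']
    simp [PySem.List.length_pyRange_one]
  rw [hg0, pv_pyRange_zero]
  simp only [List.foldl_map]
  rw [pv_outer_inv n.toNat n.toNat (le_refl _)]
  simp only [Nat.sub_self, List.replicate_zero, List.append_nil]
  rw [pv_answer]

theorem main_eq (n left right : Int) : solution n left right = solution_alt n left right := by
  rw [pv_A_flat]
  by_cases hn0 : n ≤ 0
  · -- n ≤ 0: the grid/flat list is empty and so is the sliced index range
    have hN0 : n.toNat = 0 := by omega
    have htot : ¬ (n > 0) := by omega
    simp only [solution_alt, htot, if_false, hN0]
    rw [PySem.List.pyRange_one_eq_nil (by omega)]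
    simp [PySem.List.slice, PySem.List.clampIdx]
  · have hn : 0 < n := by omega
    have hnN : ((n.toNat : Int)) = n := Int.toNat_of_nonneg (by omega)
    set N : Nat := n.toNat with hN
    set M : Nat := N * N with hM
    have htot : (if n > 0 then n * n else 0) = (M:Int) := by
      rw [if_pos hn, hM]; push_cast [hnN]; ring
    simp only [solution_alt, htot]
    set L : Nat := PySem.List.clampIdx M left with hL
    set H : Nat := PySem.List.clampIdx M (right+1) with hH
    have hLM : L ≤ M := PySem.List.clampIdx_le M left
    have hHM : H ≤ M := PySem.List.clampIdx_le M (right+1)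
    have hRm : PySem.List.pyRange 0 (M:Int) 1 = (List.range M).map (fun (k : Nat) => (k:Int)) := by
      rw [PySem.List.pyRange_one]; norm_num
    have hsliceA : PySem.List.slice ((List.range M).map (fun k => pvFlat N k)) (some left) (some (right+1))
        = List.take (H - L) (List.drop L ((List.range M).map (fun k => pvFlat N k))) := by
      simp only [PySem.List.slice, List.length_map, List.length_range, ← hL, ← hH]
    have hsliceB : PySem.List.slice ((List.range M).map (fun (k : Nat) => (k:Int))) (some left) (some (right+1))
        = List.take (H - L) (List.drop L ((List.range M).map (fun (k : Nat) => (k:Int)))) := by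
      simp only [PySem.List.slice, List.length_map, List.length_range, ← hL, ← hH]
    rw [hRm, hsliceA, hsliceB]
    apply List.ext_getElem
    · simp
    · intro k hk1 hk2
      have hkHL : k < H - L := by
        have := hk1; simp at this; omega
      have hkM : L + k < M := by omega
      simp only [List.getElem_map, List.getElem_take, List.getElem_drop, List.getElem_range]
      rw [← hnN, PySem.Int.floordiv_natCast, PySem.Int.mod_natCast]
      simp only [pvFlat, pvCell]
      push_cast
      omega

-- ===== VERDICT (by name: the statement is the Claim_ definition above) =====
theorem solution_spec : Claim_equal_solution := by
  intro n left right _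
  unfold Spec_solution
  exact main_eq n left right
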